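-- pv_equiv track=rewrite | github.com/kereeshkacxz/PersonalAlbum | app.py | check_validation_login
-- ===== SOURCE A (Python) =====
-- def check_validation_login(login):
--     if not login or len(login) > 16:
--         return False
--     if not("a" <= login[0] <= "z" or "A" <= login[0] <= "Z"):
--         return False
--     for i in login:
--         if not(("a" <= i <= "z") or ("A" <= i <= "Z") or (i == "_") or ("0" <= i <= "9")):
--             return False
--     return True
-- ===== SOURCE B (Python) =====
-- DEAD = -1
--
-- def _step(state, ch):
--     # DFA transition: state = number of characters accepted so far (0..16), DEAD = reject
--     if state == DEAD or state == 16: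
--         return DEAD
--     if state == 0:
--         return 1 if ("a" <= ch <= "z" or "A" <= ch <= "Z") else DEAD
--     return state + 1 if ("a" <= ch <= "z" or "A" <= ch <= "Z" or ch == "_" or "0" <= ch <= "9") else DEAD
--
-- def check_validation_login(login):
--     state = 0
--     for ch in login:
--         state = _step(state, ch)
--     return state > 0
-- ===== Notes on version B (the rewrite author's own statement) =====
-- stated objective: alternative
-- what changed: Replaces A's staged guards (length check, first-char check, then a scan loop with early returns) by a single left-to-right run of an explicit finite automaton whose state counts accepted characters, with a dead state for rejection; acceptance is state > 0 at the end.
import Mathlib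
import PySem

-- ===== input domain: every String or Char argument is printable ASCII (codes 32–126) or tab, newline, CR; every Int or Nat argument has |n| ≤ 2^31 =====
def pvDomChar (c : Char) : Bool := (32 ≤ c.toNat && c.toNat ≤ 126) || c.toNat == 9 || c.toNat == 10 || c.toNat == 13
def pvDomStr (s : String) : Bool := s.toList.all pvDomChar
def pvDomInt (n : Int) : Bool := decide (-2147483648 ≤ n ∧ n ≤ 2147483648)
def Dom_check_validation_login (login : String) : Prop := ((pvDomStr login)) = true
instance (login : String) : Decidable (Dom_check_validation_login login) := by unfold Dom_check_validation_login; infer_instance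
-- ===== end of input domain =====

-- B replaces A's staged guards and scan loop by a single left-to-right run of an explicit
-- finite automaton (state = number of accepted characters, -1 = dead); same value, "alternative".

-- ===== PORT A =====
-- "a" <= i <= "z" on a one-character string is the character order
def pvLetter (c : Char) : Bool :=
  (decide ('a' ≤ c) && decide (c ≤ 'z')) || (decide ('A' ≤ c) && decide (c ≤ 'Z'))

def pvLoginChar (c : Char) : Bool :=
  pvLetter c || c == '_' || (decide ('0' ≤ c) && decide (c ≤ '9'))

-- the `for i in login` loop with its early return
def pvCheckLoop : List Char → Bool
  | [] => true
  | c :: rest => if !(pvLoginChar c) then false else pvCheckLoop rest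

def check_validation_login (login : String) : Bool :=
  let cs := login.toList
  if decide (cs.length = 0) || decide (16 < cs.length) then false
  else
    match cs with
    | [] => false
    | c0 :: _ => if !(pvLetter c0) then false else pvCheckLoop cs

-- ===== PORT B =====
-- DFA transition (_step in Source B); DEAD = -1
def pvStep (state : Int) (ch : Char) : Int :=
  if state == -1 || state == 16 then -1
  else if state == 0 then (if pvLetter ch then 1 else -1)
  else (if pvLoginChar ch then state + 1 else -1)

def check_validation_login_alt (login : String) : Bool :=
  decide (0 < login.toList.foldl pvStep 0)

-- ===== PRECONDITION & SPEC =====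
def Spec_check_validation_login (login : String) (out : Bool) : Prop := out = check_validation_login_alt login
instance (login : String) (out : Bool) : Decidable (Spec_check_validation_login login out) := by unfold Spec_check_validation_login; infer_instance

-- ===== CLAIM (what is proved, stated in full; the proofs are below) =====
def Claim_equal_check_validation_login : Prop := ∀ (login : String), Dom_check_validation_login login → Spec_check_validation_login login (check_validation_login login)

-- ===== LEMMAS AND PROOFS =====
theorem pvStep_dead (l : List Char) : l.foldl pvStep (-1) = -1 := by
  induction l with
  | nil => rfl
  | cons c r ih => simpa [pvStep] using ih

theorem pvStep_run (l : List Char) : ∀ n : Int, 1 ≤ n → n ≤ 16 →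
    l.foldl pvStep n =
      (if l.all pvLoginChar = true ∧ n + (l.length : Int) ≤ 16 then n + (l.length : Int) else -1) := by
  induction l with
  | nil =>
    intro n h1 h16
    simp only [List.foldl_nil, List.all_nil, List.length_nil, Nat.cast_zero, add_zero, true_and]
    rw [if_pos (by omega)]
  | cons c r ih =>
    intro n h1 h16
    have hne1 : (n == -1) = false := by simp; omega
    simp only [List.foldl_cons, List.all_cons, List.length_cons, Nat.cast_add, Nat.cast_one,
      Bool.and_eq_true]
    by_cases h16' : n = 16
    · subst h16'
      simp only [pvStep, hne1, Bool.false_or, beq_self_eq_true, if_true, pvStep_dead]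
      rw [if_neg]; omega
    · have hne16 : (n == 16) = false := by simp; omega
      have hne0 : (n == 0) = false := by simp; omega
      simp only [pvStep, hne1, hne16, hne0, Bool.or_self, Bool.false_eq_true, if_false]
      by_cases hc : pvLoginChar c = true
      · rw [if_pos hc, ih (n + 1) (by omega) (by omega)]
        by_cases hl : r.all pvLoginChar = true ∧ n + 1 + (r.length : Int) ≤ 16
        · rw [if_pos hl, if_pos ⟨⟨hc, hl.1⟩, by have := hl.2; omega⟩]; ring
        · rw [if_neg hl, if_neg]
          rintro ⟨⟨_, ha⟩, hb⟩; exact hl ⟨ha, by omega⟩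
      · rw [if_neg hc, pvStep_dead, if_neg]
        rintro ⟨⟨h, _⟩, _⟩; exact hc h

theorem pvCheckLoop_eq_all (l : List Char) : pvCheckLoop l = l.all pvLoginChar := by
  induction l with
  | nil => rfl
  | cons c r ih => cases h : pvLoginChar c <;> simp [pvCheckLoop, h, ih]

theorem pv_main (l : List Char) :
    (if decide (l.length = 0) || decide (16 < l.length) then false
     else match l with
          | [] => false
          | c0 :: _ => if !(pvLetter c0) then false else pvCheckLoop l)
    = decide (0 < l.foldl pvStep 0) := by
  cases l with
  | nil => rfl
  | cons c r =>
    cases hc : pvLetter c with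
    | false =>
      have hfold : List.foldl pvStep 0 (c :: r) = -1 := by
        simp only [List.foldl_cons]
        rw [show pvStep 0 c = -1 from by simp [pvStep, hc], pvStep_dead]
      simp only [hfold, hc]
      simp
    | true =>
      have hcl : pvLoginChar c = true := by simp [pvLoginChar, hc]
      have hfold : List.foldl pvStep 0 (c :: r)
          = if r.all pvLoginChar = true ∧ 1 + (r.length : Int) ≤ 16 then 1 + (r.length : Int) else -1 := by
        simp only [List.foldl_cons]
        rw [show pvStep 0 c = 1 from by simp [pvStep, hc]]
        exact pvStep_run r 1 (by omega) (by omega)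
      simp only [hfold, hc, Bool.not_true, Bool.false_eq_true, if_false]
      rw [pvCheckLoop_eq_all]
      simp only [List.all_cons, hcl, Bool.true_and, List.length_cons]
      by_cases hl : r.all pvLoginChar = true ∧ 1 + (r.length : Int) ≤ 16
      · rw [if_pos hl]
        have hlen : ¬ (16 < r.length + 1) := by have := hl.2; omega
        simp only [hlen, decide_false, Nat.add_eq_zero_iff, List.length_eq_zero_iff, hl.1]
        have : (0:Int) < 1 + (r.length : Int) := by omega
        simp [this]
      · rw [if_neg hl]
        have hd : decide ((0:Int) < -1) = false := by decide
        rw [hd]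
        rcases Decidable.not_and_iff_or_not.mp hl with h | h
        · have : r.all pvLoginChar = false := by simpa using h
          simp [this]
        · have hlen : 16 < r.length + 1 := by omega
          simp [hlen]

-- ===== VERDICT (by name: the statement is the Claim_ definition above) =====
theorem check_validation_login_spec : Claim_equal_check_validation_login := by
  intro login _
  unfold Spec_check_validation_login check_validation_login check_validation_login_alt
  exact pv_main login.toList
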